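-- pv_equiv track=rewrite | github.com/karranb/advent-of-code-2020 | day10.py | find_possibilities2
-- ===== SOURCE A (Python) =====
-- def find_possibilities2(_adapters):
--     cache = {}
--
--     def dp(x):
--         if x in cache:
--             return cache[x]
--         answ = 1
--         for i in range(x + 3, len(_adapters)):
--             if _adapters[i] - _adapters[i - 3] <= 3:
--                 answ += dp(i)
--             if _adapters[i - 1] - _adapters[i - 3] <= 3:
--                 answ += dp(i - 1)
--         cache[x] = answ
--         return answ
--
--     return dp(0)
-- ===== SOURCE B (Python) =====
-- def find_possibilities2(_adapters):
--     n = len(_adapters)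
--     dp = [1] * (n + 1)
--     for x in range(n - 4, -1, -1):
--         total = dp[x + 1]
--         if _adapters[x + 3] - _adapters[x] <= 3:
--             total += dp[x + 3]
--         if _adapters[x + 2] - _adapters[x] <= 3:
--             total += dp[x + 2]
--         dp[x] = total
--     return dp[0]
-- ===== Notes on version B (the rewrite author's own statement) =====
-- stated objective: faster
-- what changed: Replaces the memoized top-down recursion (whose dp(x) re-scans the whole suffix range(x+3, n)) with a single bottom-up pass using the suffix recurrence dp[x] = dp[x+1] + [a[x+3]-a[x]<=3]*dp[x+3] + [a[x+2]-a[x]<=3]*dp[x+2] over a flat array.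
import Mathlib
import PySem

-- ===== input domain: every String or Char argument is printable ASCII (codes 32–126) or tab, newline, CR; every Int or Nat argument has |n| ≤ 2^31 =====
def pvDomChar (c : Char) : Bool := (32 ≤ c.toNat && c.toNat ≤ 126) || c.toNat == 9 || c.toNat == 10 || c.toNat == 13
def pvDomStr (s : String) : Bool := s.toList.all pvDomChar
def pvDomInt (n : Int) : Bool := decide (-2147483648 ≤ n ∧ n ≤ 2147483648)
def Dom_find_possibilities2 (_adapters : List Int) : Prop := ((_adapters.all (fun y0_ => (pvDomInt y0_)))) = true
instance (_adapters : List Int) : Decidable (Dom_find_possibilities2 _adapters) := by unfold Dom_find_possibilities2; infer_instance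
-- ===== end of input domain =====

-- B replaces A's memoized top-down recursion (each dp(x) re-scans the suffix range(x+3, n); O(n^2))
-- by one bottom-up pass over a flat table using the suffix recurrence dp[x] = dp[x+1] + conditional
-- dp[x+3]/dp[x+2] terms (O(n)); a timing run measured B faster on large inputs.

-- ===== PORT A =====
-- A's dp(x): memoized recursion; the cache dict is threaded through explicitly. The fuel argument
-- only makes the recursion structural; find_possibilities2 supplies enough fuel (a.length + 1) that
-- it is never exhausted (proved in dpA_main below), so this is exact. All list indices i, i-1, i-3
-- lie in range(len) whenever accessed, so pyGetD with default 0 is exact (Python never raises here).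
def dpA (a : List Int) : Nat → Int → PySem.Dict Int Int → Int × PySem.Dict Int Int
  | 0, _, c => (0, c)  -- fuel exhausted: unreachable with the fuel supplied below
  | fuel + 1, x, c =>
    match c.get? x with
    | some v => (v, c)
    | none =>
      let st := (PySem.List.pyRange (x + 3) (a.length : Int) 1).foldl
        (fun (st : Int × PySem.Dict Int Int) i =>
          let st :=
            if PySem.List.pyGetD a i 0 - PySem.List.pyGetD a (i - 3) 0 ≤ 3 then
              let r := dpA a fuel i st.2
              (st.1 + r.1, r.2)
            else st
          if PySem.List.pyGetD a (i - 1) 0 - PySem.List.pyGetD a (i - 3) 0 ≤ 3 then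
            let r := dpA a fuel (i - 1) st.2
            (st.1 + r.1, r.2)
          else st)
        (1, c)
      (st.1, st.2.insert x st.1)

def find_possibilities2 (_adapters : List Int) : Int :=
  (dpA _adapters (_adapters.length + 1) 0 PySem.Dict.empty).1

-- ===== PORT B =====
-- dp = [1] * (n + 1); for x in range(n - 4, -1, -1): dp[x] = total; return dp[0]
def find_possibilities2_alt (_adapters : List Int) : Int :=
  let n : Int := (_adapters.length : Int)
  let dp : List Int := List.replicate (_adapters.length + 1) 1
  let dp := (PySem.List.pyRange (n - 4) (-1) (-1)).foldl
    (fun dp x =>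
      let total := PySem.List.pyGetD dp (x + 1) 0
      let total :=
        if PySem.List.pyGetD _adapters (x + 3) 0 - PySem.List.pyGetD _adapters x 0 ≤ 3 then
          total + PySem.List.pyGetD dp (x + 3) 0
        else total
      let total :=
        if PySem.List.pyGetD _adapters (x + 2) 0 - PySem.List.pyGetD _adapters x 0 ≤ 3 then
          total + PySem.List.pyGetD dp (x + 2) 0
        else total
      PySem.List.pySetD dp x total)
    dp
  PySem.List.pyGetD dp 0 0

-- ===== PRECONDITION & SPEC =====
def Spec_find_possibilities2 (_adapters : List Int) (out : Int) : Prop := out = find_possibilities2_alt _adapters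
instance (_adapters : List Int) (out : Int) : Decidable (Spec_find_possibilities2 _adapters out) := by unfold Spec_find_possibilities2; infer_instance

-- ===== CLAIM (what is proved, stated in full; the proofs are below) =====
def Claim_equal_find_possibilities2 : Prop := ∀ (_adapters : List Int), Dom_find_possibilities2 _adapters → Spec_find_possibilities2 _adapters (find_possibilities2 _adapters)

-- ===== LEMMAS AND PROOFS =====

-- The common mathematical value: G a x = A's dp(x) = B's dp[x].
def G (a : List Int) (x : Nat) : Int :=
  if _h : x + 3 < a.length then
    G a (x + 1)
      + (if a.getD (x + 3) 0 - a.getD x 0 ≤ 3 then G a (x + 3) else 0)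
      + (if a.getD (x + 2) 0 - a.getD x 0 ≤ 3 then G a (x + 2) else 0)
  else 1
termination_by a.length - x
decreasing_by all_goals omega

-- term contributed by loop index m of A's inner loop (m ranges over x+3 … len-1)
def termAt (a : List Int) (m : Nat) : Int :=
  (if a.getD m 0 - a.getD (m - 3) 0 ≤ 3 then G a m else 0)
    + (if a.getD (m - 1) 0 - a.getD (m - 3) 0 ≤ 3 then G a (m - 1) else 0)

-- every cached value is correct
def CacheInv (a : List Int) (c : PySem.Dict Int Int) : Prop :=
  ∀ k v, c.get? k = some v → 0 ≤ k ∧ v = G a k.toNat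

lemma G_high (a : List Int) (x : Nat) (h : a.length ≤ x + 3) : G a x = 1 := by
  rw [G, dif_neg (by omega)]

lemma termAt_shift (a : List Int) (x : Nat) :
    termAt a (x + 3) =
      (if a.getD (x + 3) 0 - a.getD x 0 ≤ 3 then G a (x + 3) else 0)
        + (if a.getD (x + 2) 0 - a.getD x 0 ≤ 3 then G a (x + 2) else 0) := by
  have h3 : x + 3 - 3 = x := by omega
  have h1 : x + 3 - 1 = x + 2 := by omega
  rw [termAt, h3, h1]

lemma G_eq_sum (a : List Int) (x : Nat) :
    G a x = 1 + ((List.range' (x + 3) (a.length - (x + 3))).map (termAt a)).sum := by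
  by_cases h : x + 3 < a.length
  · have IH := G_eq_sum a (x + 1)
    have hr : a.length - (x + 3) = (a.length - (x + 4)) + 1 := by omega
    rw [G, dif_pos h, IH, hr, List.range'_succ, List.map_cons, List.sum_cons, termAt_shift]
    have h14 : x + 3 + 1 = x + 1 + 3 := by omega
    rw [h14]
    ring
  · have h0 : a.length - (x + 3) = 0 := by omega
    rw [G, dif_neg h, h0]
    simp
termination_by a.length - x
decreasing_by omega

lemma getD_set_ne (l : List Int) (m k : Nat) (v : Int) (h : ¬ (k = m)) :
    (l.set k v).getD m 0 = l.getD m 0 := by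
  simp [List.getD, h]

lemma getD_set_self (l : List Int) (k : Nat) (v : Int) (h : k < l.length) :
    (l.set k v).getD k 0 = v := by
  simp [List.getD, h]

-- ===== A-side: the memoized loop =====

lemma loopA (a : List Int) (fuel : Nat)
    (IH : ∀ (y : Int) (c : PySem.Dict Int Int), 0 ≤ y → (a.length : Int) - y < fuel →
      1 ≤ fuel → CacheInv a c →
      (dpA a fuel y c).1 = G a y.toNat ∧ CacheInv a (dpA a fuel y c).2)
    (x : Int) (hx : 0 ≤ x) (hfuel : (a.length : Int) - x ≤ fuel) :
    ∀ (k : Nat) (i : Int) (answ : Int) (c : PySem.Dict Int Int),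
      x + 3 ≤ i → (a.length : Int) - i ≤ k → CacheInv a c →
      ((PySem.List.pyRange i (a.length : Int) 1).foldl
        (fun (st : Int × PySem.Dict Int Int) i =>
          let st :=
            if PySem.List.pyGetD a i 0 - PySem.List.pyGetD a (i - 3) 0 ≤ 3 then
              let r := dpA a fuel i st.2
              (st.1 + r.1, r.2)
            else st
          if PySem.List.pyGetD a (i - 1) 0 - PySem.List.pyGetD a (i - 3) 0 ≤ 3 then
            let r := dpA a fuel (i - 1) st.2
            (st.1 + r.1, r.2)
          else st)
        (answ, c)).1
        = answ + ((List.range' i.toNat (a.length - i.toNat)).map (termAt a)).sum ∧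
      CacheInv a ((PySem.List.pyRange i (a.length : Int) 1).foldl
        (fun (st : Int × PySem.Dict Int Int) i =>
          let st :=
            if PySem.List.pyGetD a i 0 - PySem.List.pyGetD a (i - 3) 0 ≤ 3 then
              let r := dpA a fuel i st.2
              (st.1 + r.1, r.2)
            else st
          if PySem.List.pyGetD a (i - 1) 0 - PySem.List.pyGetD a (i - 3) 0 ≤ 3 then
            let r := dpA a fuel (i - 1) st.2
            (st.1 + r.1, r.2)
          else st)
        (answ, c)).2 := by
  intro k
  induction k with
  | zero =>
    intro i answ c hi hk hc
    rw [PySem.List.pyRange_one_eq_nil (by omega)]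
    have h0 : a.length - i.toNat = 0 := by omega
    rw [h0]
    simpa using hc
  | succ k ih =>
    intro i answ c hi hk hc
    by_cases hni : (a.length : Int) ≤ i
    · rw [PySem.List.pyRange_one_eq_nil hni]
      have h0 : a.length - i.toNat = 0 := by omega
      rw [h0]
      simpa using hc
    · have hin : i < (a.length : Int) := by omega
      have htn : (0:Int) ≤ i := by omega
      have e0 : PySem.List.pyGetD a i 0 = a.getD i.toNat 0 :=
        PySem.List.pyGetD_of_nonneg a 0 (by omega)
      have e3 : PySem.List.pyGetD a (i - 3) 0 = a.getD (i.toNat - 3) 0 := by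
        rw [PySem.List.pyGetD_of_nonneg a 0 (by omega)]
        congr 1
        omega
      have e1 : PySem.List.pyGetD a (i - 1) 0 = a.getD (i.toNat - 1) 0 := by
        rw [PySem.List.pyGetD_of_nonneg a 0 (by omega)]
        congr 1
        omega
      obtain ⟨hv1, hc1⟩ := IH i c (by omega) (by omega) (by omega) hc
      obtain ⟨hv1', hc1'⟩ := IH (i - 1) c (by omega) (by omega) (by omega) hc
      obtain ⟨hv2, hc2⟩ := IH (i - 1) (dpA a fuel i c).2 (by omega) (by omega) (by omega) hc1
      have hieq : (i - 1).toNat = i.toNat - 1 := by omega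
      have hsplit : a.length - i.toNat = (a.length - (i.toNat + 1)) + 1 := by omega
      have hi1 : (i + 1).toNat = i.toNat + 1 := by omega
      rw [PySem.List.pyRange_one_cons (by omega), List.foldl_cons]
      simp only [e0, e3, e1]
      rw [hsplit, List.range'_succ, List.map_cons, List.sum_cons]
      by_cases h3 : a.getD i.toNat 0 - a.getD (i.toNat - 3) 0 ≤ 3 <;>
        by_cases h1 : a.getD (i.toNat - 1) 0 - a.getD (i.toNat - 3) 0 ≤ 3 <;>
        simp only [h3, h1, if_pos, if_neg, not_false_iff]
      · -- both conditions hold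
        obtain ⟨ha, hb⟩ := ih (i + 1)
          (answ + (dpA a fuel i c).1 + (dpA a fuel (i - 1) (dpA a fuel i c).2).1)
          ((dpA a fuel (i - 1) (dpA a fuel i c).2).2) (by omega) (by omega) hc2
        rw [hi1] at ha
        refine ⟨?_, hb⟩
        have ht : termAt a i.toNat = G a i.toNat + G a (i.toNat - 1) := by
          rw [termAt, if_pos h3, if_pos h1]
        rw [ha, hv1, hv2, hieq, ht]
        ring
      · -- only the first condition holds
        obtain ⟨ha, hb⟩ := ih (i + 1)
          (answ + (dpA a fuel i c).1) ((dpA a fuel i c).2) (by omega) (by omega) hc1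
        rw [hi1] at ha
        refine ⟨?_, hb⟩
        have ht : termAt a i.toNat = G a i.toNat + 0 := by
          rw [termAt, if_pos h3, if_neg h1]
        rw [ha, hv1, ht]
        ring
      · -- only the second condition holds
        obtain ⟨ha, hb⟩ := ih (i + 1)
          (answ + (dpA a fuel (i - 1) c).1) ((dpA a fuel (i - 1) c).2) (by omega) (by omega) hc1'
        rw [hi1] at ha
        refine ⟨?_, hb⟩
        have ht : termAt a i.toNat = 0 + G a (i.toNat - 1) := by
          rw [termAt, if_neg h3, if_pos h1]
        rw [ha, hv1', hieq, ht]
        ring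
      · -- neither condition holds
        obtain ⟨ha, hb⟩ := ih (i + 1) answ c (by omega) (by omega) hc
        rw [hi1] at ha
        refine ⟨?_, hb⟩
        have ht : termAt a i.toNat = 0 + 0 := by
          rw [termAt, if_neg h3, if_neg h1]
        rw [ha, ht]
        ring

lemma dpA_main (a : List Int) :
    ∀ (fuel : Nat) (x : Int) (c : PySem.Dict Int Int), 0 ≤ x → (a.length : Int) - x < fuel →
      1 ≤ fuel → CacheInv a c →
      (dpA a fuel x c).1 = G a x.toNat ∧ CacheInv a (dpA a fuel x c).2 := by
  intro fuel
  induction fuel with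
  | zero => intro x c _ _ h _; omega
  | succ fuel ih =>
    intro x c hx hf _ hc
    rw [dpA]
    cases hg : c.get? x with
    | some v =>
      obtain ⟨_, hv⟩ := hc x v hg
      exact ⟨hv, hc⟩
    | none =>
      obtain ⟨h1, h2⟩ :=
        loopA a fuel ih x hx (by omega) a.length (x + 3) 1 c (by omega) (by omega) hc
      have hx3 : (x + 3).toNat = x.toNat + 3 := by omega
      rw [hx3] at h1
      refine ⟨?_, ?_⟩
      · rw [h1, ← G_eq_sum]
      · intro k v hkv
        rw [PySem.Dict.get?_insert] at hkv
        by_cases hxk : k = x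
        · rw [if_pos hxk] at hkv
          subst hxk
          injection hkv with hkv
          refine ⟨hx, ?_⟩
          rw [← hkv, h1]
          exact (G_eq_sum a k.toNat).symm
        · rw [if_neg hxk] at hkv
          exact h2 k v hkv

lemma A_eq_G (a : List Int) : find_possibilities2 a = G a 0 := by
  have hc : CacheInv a PySem.Dict.empty := by
    intro k v h
    simp [PySem.Dict.get?_empty] at h
  obtain ⟨h1, _⟩ := dpA_main a (a.length + 1) 0 PySem.Dict.empty (le_refl 0)
    (by push_cast; omega) (by omega) hc
  simpa [find_possibilities2] using h1

-- ===== B-side: the bottom-up table =====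

lemma loopB (a : List Int) :
    ∀ (k : Nat) (x : Int) (dp : List Int),
      x ≤ (a.length : Int) - 4 → x + 1 ≤ (k : Int) →
      dp.length = a.length + 1 →
      (∀ m : Nat, x < (m : Int) → m ≤ a.length → dp.getD m 0 = G a m) →
      (((PySem.List.pyRange x (-1) (-1)).foldl
          (fun dp x =>
            let total := PySem.List.pyGetD dp (x + 1) 0
            let total :=
              if PySem.List.pyGetD a (x + 3) 0 - PySem.List.pyGetD a x 0 ≤ 3 then
                total + PySem.List.pyGetD dp (x + 3) 0
              else total
            let total :=
              if PySem.List.pyGetD a (x + 2) 0 - PySem.List.pyGetD a x 0 ≤ 3 then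
                total + PySem.List.pyGetD dp (x + 2) 0
              else total
            PySem.List.pySetD dp x total)
          dp).length = a.length + 1 ∧
        ∀ m : Nat, m ≤ a.length →
          ((PySem.List.pyRange x (-1) (-1)).foldl
            (fun dp x =>
              let total := PySem.List.pyGetD dp (x + 1) 0
              let total :=
                if PySem.List.pyGetD a (x + 3) 0 - PySem.List.pyGetD a x 0 ≤ 3 then
                  total + PySem.List.pyGetD dp (x + 3) 0
                else total
              let total :=
                if PySem.List.pyGetD a (x + 2) 0 - PySem.List.pyGetD a x 0 ≤ 3 then
                  total + PySem.List.pyGetD dp (x + 2) 0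
                else total
              PySem.List.pySetD dp x total)
            dp).getD m 0 = G a m) := by
  intro k
  induction k with
  | zero =>
    intro x dp hx hk hlen hdp
    rw [PySem.List.pyRange_neg_one_eq_nil (by omega)]
    exact ⟨hlen, fun m hm => hdp m (by omega) hm⟩
  | succ k ih =>
    intro x dp hx hk hlen hdp
    by_cases hneg : x ≤ -1
    · rw [PySem.List.pyRange_neg_one_eq_nil (by omega)]
      exact ⟨hlen, fun m hm => hdp m (by omega) hm⟩
    · have hx0 : (0 : Int) ≤ x := by omega
      have hn4 : x.toNat + 4 ≤ a.length := by omega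
      rw [PySem.List.pyRange_neg_one_cons (by omega), List.foldl_cons]
      have eg : ∀ j : Nat, PySem.List.pyGetD a (x + (j : Int)) 0 = a.getD (x.toNat + j) 0 := by
        intro j
        rw [PySem.List.pyGetD_of_nonneg a 0 (by omega)]
        congr 1
        omega
      have ed : ∀ j : Nat, PySem.List.pyGetD dp (x + (j : Int)) 0 = dp.getD (x.toNat + j) 0 := by
        intro j
        rw [PySem.List.pyGetD_of_nonneg dp 0 (by omega)]
        congr 1
        omega
      have e0 : PySem.List.pyGetD a x 0 = a.getD x.toNat 0 := by
        rw [PySem.List.pyGetD_of_nonneg a 0 hx0]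
      have eq1 : (x + 1 : Int) = x + ((1 : Nat) : Int) := by norm_num
      have eq2 : (x + 2 : Int) = x + ((2 : Nat) : Int) := by norm_num
      have eq3 : (x + 3 : Int) = x + ((3 : Nat) : Int) := by norm_num
      have hset : ∀ t : Int, PySem.List.pySetD dp x t = dp.set x.toNat t :=
        fun t => PySem.List.pySetD_of_nonneg dp t hx0
      simp only [eq1, eq2, eq3, eg, ed, e0, hset]
      -- the freshly written entry is G a x.toNat
      have hv1 : dp.getD (x.toNat + 1) 0 = G a (x.toNat + 1) := hdp _ (by omega) (by omega)
      have hv2 : dp.getD (x.toNat + 2) 0 = G a (x.toNat + 2) := hdp _ (by omega) (by omega)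
      have hv3 : dp.getD (x.toNat + 3) 0 = G a (x.toNat + 3) := hdp _ (by omega) (by omega)
      have htot :
          (if a.getD (x.toNat + 2) 0 - a.getD x.toNat 0 ≤ 3 then
            (if a.getD (x.toNat + 3) 0 - a.getD x.toNat 0 ≤ 3 then
                dp.getD (x.toNat + 1) 0 + dp.getD (x.toNat + 3) 0
              else dp.getD (x.toNat + 1) 0) + dp.getD (x.toNat + 2) 0
          else
            (if a.getD (x.toNat + 3) 0 - a.getD x.toNat 0 ≤ 3 then
                dp.getD (x.toNat + 1) 0 + dp.getD (x.toNat + 3) 0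
              else dp.getD (x.toNat + 1) 0)) = G a x.toNat := by
        rw [hv1, hv2, hv3]
        conv_rhs => rw [G]
        rw [dif_pos (by omega)]
        split_ifs <;> ring
      apply ih (x - 1) (dp.set x.toNat _) (by omega) (by omega)
        (by rw [List.length_set]; exact hlen)
      intro m hm1 hm2
      by_cases hmx : x.toNat = m
      · subst hmx
        rw [getD_set_self dp _ _ (by omega)]
        exact htot
      · rw [getD_set_ne dp m x.toNat _ hmx]
        exact hdp m (by omega) hm2

lemma B_eq_G (a : List Int) : find_possibilities2_alt a = G a 0 := by
  have hinit : ∀ m : Nat, (a.length : Int) - 4 < (m : Int) → m ≤ a.length →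
      (List.replicate (a.length + 1) (1 : Int)).getD m 0 = G a m := by
    intro m h1 h2
    rw [List.getD_replicate 1 (by omega), G_high a m (by omega)]
  obtain ⟨hl, hm⟩ := loopB a (a.length + 1) ((a.length : Int) - 4)
    (List.replicate (a.length + 1) 1) (le_refl _) (by push_cast; omega)
    (by rw [List.length_replicate]) hinit
  have h0 := hm 0 (Nat.zero_le _)
  simp only [find_possibilities2_alt]
  rw [PySem.List.pyGetD_of_nonneg _ 0 (by omega)]
  exact h0

-- ===== VERDICT (by name: the statement is the Claim_ definition above) =====
theorem find_possibilities2_spec : Claim_equal_find_possibilities2 := by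
  intro a _
  unfold Spec_find_possibilities2
  rw [A_eq_G, B_eq_G]
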